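-- pv_equiv track=rewrite | github.com/gmautner/locaweb-cloud-deploy | scripts/rotate_ssh_key.py | classify_vms
-- ===== SOURCE A (Python) =====
-- def classify_vms(vms):
--     """Classify VMs into web, workers, and accessories for rotation order.
--
--     VM names are short: "web", "worker-1", "db", etc. (not prefixed with
--     the network name).
--     """
--     web = []
--     workers = []
--     accessories = []
--
--     for vm in vms:
--         name = vm["name"]
--         if name == "web":
--             web.append(vm)
--         elif name.startswith("worker-"):
--             workers.append(vm)
--         else:
--             accessories.append(vm)
--
--     # Rotation order: accessories first, then workers, then web last
--     return accessories + workers + web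
-- ===== SOURCE B (Python) =====
-- def classify_vms(vms):
--     """Classify VMs into web, workers, and accessories for rotation order.
--
--     Single stable sort by rotation priority: accessories (0) first,
--     then workers (1), then web (2); original order kept within each group.
--     """
--     def priority(vm):
--         name = vm["name"]
--         if name == "web":
--             return 2
--         if name.startswith("worker-"):
--             return 1
--         return 0
--
--     return sorted(vms, key=priority)
-- ===== Notes on version B (the rewrite author's own statement) =====
-- stated objective: idiomatic
-- what changed: Replaces the three-bucket accumulation loop and list concatenation with a single stable sorted() call keyed by rotation priority (accessories=0, workers=1, web=2).
import Mathlib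
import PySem

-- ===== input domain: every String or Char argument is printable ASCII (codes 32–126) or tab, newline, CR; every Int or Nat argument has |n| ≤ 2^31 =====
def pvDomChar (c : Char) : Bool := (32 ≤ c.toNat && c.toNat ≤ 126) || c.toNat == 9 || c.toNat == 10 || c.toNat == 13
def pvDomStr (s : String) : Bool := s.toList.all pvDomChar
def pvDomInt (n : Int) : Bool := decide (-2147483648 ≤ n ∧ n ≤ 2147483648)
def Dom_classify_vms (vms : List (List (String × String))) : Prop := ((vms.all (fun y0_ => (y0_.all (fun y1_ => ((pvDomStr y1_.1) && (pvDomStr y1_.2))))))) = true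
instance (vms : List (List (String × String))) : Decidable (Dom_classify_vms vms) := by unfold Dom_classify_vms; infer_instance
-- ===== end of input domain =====

-- B replaces A's three-bucket accumulation loop with one stable sorted() by rotation
-- priority (objective: idiomatic). Equivalence of the RETURN value; neither mutates its input.

-- ===== PORT A =====
-- vm["name"]: first-match lookup; Pre_ guarantees the key is present (Python raises KeyError otherwise),
-- so the getD default "" is never reached on admitted inputs.
def pvName (vm : List (String × String)) : String :=
  ((PySem.Dict.mk vm).get? "name").getD ""

def classify_vms (vms : List (List (String × String))) : List (List (String × String)) :=
  -- state (web, workers, accessories), each appended at the back as in A's loop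
  let st := vms.foldl
    (fun (st : List (List (String × String)) × List (List (String × String)) × List (List (String × String))) vm =>
      if pvName vm = "web" then (st.1 ++ [vm], st.2.1, st.2.2)
      else if PySem.Str.startswith (pvName vm) "worker-" then (st.1, st.2.1 ++ [vm], st.2.2)
      else (st.1, st.2.1, st.2.2 ++ [vm]))
    ([], [], [])
  st.2.2 ++ st.2.1 ++ st.1

-- ===== PORT B =====
def pvPriority (vm : List (String × String)) : Int :=
  if pvName vm = "web" then 2
  else if PySem.Str.startswith (pvName vm) "worker-" then 1
  else 0

def classify_vms_alt (vms : List (List (String × String))) : List (List (String × String)) :=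
  PySem.List.sorted vms pvPriority

-- ===== PRECONDITION & SPEC =====
-- Pre_ excludes exactly the inputs where some vm has no "name" key: there Python A (and B) raise KeyError.
def Pre_classify_vms (vms : List (List (String × String))) : Prop :=
  ∀ vm ∈ vms, ((PySem.Dict.mk vm).get? "name").isSome
instance (vms : List (List (String × String))) : Decidable (Pre_classify_vms vms) := by
  unfold Pre_classify_vms; infer_instance

def pvWitness_classify_vms : (List (List (String × String))) :=
  [[("name", "web")], [("name", "db")], [("name", "worker-1")]]

def Spec_classify_vms (vms : List (List (String × String))) (out : List (List (String × String))) : Prop := out = classify_vms_alt vms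
instance (vms : List (List (String × String))) (out : List (List (String × String))) : Decidable (Spec_classify_vms vms out) := by unfold Spec_classify_vms; infer_instance

-- ===== CLAIM (what is proved, stated in full; the proofs are below) =====
def Claim_equal_classify_vms : Prop := ∀ (vms : List (List (String × String))), Dom_classify_vms vms → Pre_classify_vms vms → Spec_classify_vms vms (classify_vms vms)

-- ===== LEMMAS AND PROOFS =====

-- insertBy walks past a block of elements x is not 'before'
theorem insertBy_append_not_before {α : Type} (before : α → α → Bool) (x : α)
    (as bs : List α) (h : ∀ a ∈ as, before x a = false) :
    PySem.List.insertBy before x (as ++ bs) = as ++ PySem.List.insertBy before x bs := by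
  induction as with
  | nil => rfl
  | cons a as ih =>
    simp only [List.cons_append, PySem.List.insertBy, h a (by simp)]
    simp only [Bool.false_eq_true, if_false, List.cons.injEq, true_and]
    exact ih (fun a ha => h a (by simp [ha]))

-- insertBy puts x in front of a block whose every element x is 'before'
theorem insertBy_all_before {α : Type} (before : α → α → Bool) (x : α)
    (bs : List α) (h : ∀ b ∈ bs, before x b = true) :
    PySem.List.insertBy before x bs = x :: bs := by
  cases bs with
  | nil => rfl
  | cons b bs => simp [PySem.List.insertBy, h b (by simp)]

-- B's stable sort on the {0,1,2}-valued priority is the three filtered groups concatenated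
theorem sorted_priority_eq_filters (vms : List (List (String × String))) :
    classify_vms_alt vms =
      vms.filter (fun v => pvPriority v = 0) ++
      vms.filter (fun v => pvPriority v = 1) ++
      vms.filter (fun v => pvPriority v = 2) := by
  have hrange : ∀ v : List (String × String),
      pvPriority v = 0 ∨ pvPriority v = 1 ∨ pvPriority v = 2 := by
    intro v; unfold pvPriority; split_ifs <;> simp
  unfold classify_vms_alt
  rw [PySem.List.sorted_eq_foldl_insertBy]
  induction vms using List.reverseRecOn with
  | nil => rfl
  | append_singleton xs x ih =>
    rw [List.foldl_append, List.foldl_cons, List.foldl_nil, ih]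
    simp only [List.filter_append, List.filter_singleton]
    rcases hrange x with h | h | h
    · rw [List.append_assoc]
      rw [insertBy_append_not_before _ x (xs.filter fun v => pvPriority v = 0)
        (xs.filter (fun v => pvPriority v = 1) ++ xs.filter (fun v => pvPriority v = 2))
        (by intro a ha; simp only [List.mem_filter, decide_eq_true_eq] at ha
            simp [h, ha.2])]
      rw [insertBy_all_before _ x _
        (by intro b hb
            simp only [List.mem_append, List.mem_filter, decide_eq_true_eq] at hb
            rcases hb with hb | hb <;> simp [h, hb.2])]
      simp [h]
    · rw [insertBy_append_not_before _ x
        ((xs.filter fun v => pvPriority v = 0) ++ xs.filter (fun v => pvPriority v = 1))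
        (xs.filter (fun v => pvPriority v = 2))
        (by intro a ha
            simp only [List.mem_append, List.mem_filter, decide_eq_true_eq] at ha
            rcases ha with ha | ha <;> simp [h, ha.2])]
      rw [insertBy_all_before _ x _
        (by intro b hb; simp only [List.mem_filter, decide_eq_true_eq] at hb
            simp [h, hb.2])]
      simp [h]
    · rw [PySem.List.insertBy_of_forall_not_before _ x _
        (by intro a ha
            simp only [List.mem_append, List.mem_filter, decide_eq_true_eq] at ha
            rcases ha with (ha | ha) | ha <;> simp [h, ha.2])]
      simp [h]

-- A's loop state after any prefix is the three filtered groups (web, workers, accessories)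
theorem classify_vms_foldl_eq_filters (vms : List (List (String × String))) :
    vms.foldl
      (fun (st : List (List (String × String)) × List (List (String × String)) × List (List (String × String))) vm =>
        if pvName vm = "web" then (st.1 ++ [vm], st.2.1, st.2.2)
        else if PySem.Str.startswith (pvName vm) "worker-" then (st.1, st.2.1 ++ [vm], st.2.2)
        else (st.1, st.2.1, st.2.2 ++ [vm]))
      ([], [], []) =
      (vms.filter (fun v => pvPriority v = 2),
       vms.filter (fun v => pvPriority v = 1),
       vms.filter (fun v => pvPriority v = 0)) := by
  induction vms using List.reverseRecOn with
  | nil => rfl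
  | append_singleton xs x ih =>
    rw [List.foldl_append, List.foldl_cons, List.foldl_nil, ih]
    simp only [List.filter_append, List.filter_singleton, pvPriority]
    split_ifs <;> simp_all

-- ===== VERDICT (by name: the statement is the Claim_ definition above) =====
theorem classify_vms_spec : Claim_equal_classify_vms := by
  intro vms _ _
  show classify_vms vms = classify_vms_alt vms
  rw [sorted_priority_eq_filters]
  unfold classify_vms
  rw [classify_vms_foldl_eq_filters]
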